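-- pv_equiv track=rewrite | github.com/amirfardanian/fasttext | capture_model/post_processing.py | valid_cvr
-- ===== SOURCE A (Python) =====
-- def valid_cvr(cvr):
--     weights = [2, 7, 6, 5, 4, 3, 2]
--     cvr_digits = [int(digit) for digit in str(cvr)]
--     if len(cvr_digits) != 8:
--         return False
--     seven_cvr_digits = cvr_digits[:-1]
--     control_digit = cvr_digits[-1]
--     mod_11 = sum(d * w for d, w in zip(seven_cvr_digits, weights)) % 11
--     return (mod_11 == 0 and control_digit == 0) or (mod_11 != 1 and (11 - mod_11) == control_digit)
-- ===== SOURCE B (Python) =====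
-- def valid_cvr(cvr):
--     digits = [int(d) for d in str(cvr)]
--     if len(digits) != 8:
--         return False
--     weights = [2, 7, 6, 5, 4, 3, 2, 1]
--     return sum(d * w for d, w in zip(digits, weights)) % 11 == 0
-- ===== Notes on version B (the rewrite author's own statement) =====
-- stated objective: simpler
-- what changed: Replaces A's reconstruction of the control digit from the 7-digit weighted sum (with the mod==0/mod==1 special cases) by a single divisibility-by-11 test of all eight digits weighted [2,7,6,5,4,3,2,1].
import Mathlib
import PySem

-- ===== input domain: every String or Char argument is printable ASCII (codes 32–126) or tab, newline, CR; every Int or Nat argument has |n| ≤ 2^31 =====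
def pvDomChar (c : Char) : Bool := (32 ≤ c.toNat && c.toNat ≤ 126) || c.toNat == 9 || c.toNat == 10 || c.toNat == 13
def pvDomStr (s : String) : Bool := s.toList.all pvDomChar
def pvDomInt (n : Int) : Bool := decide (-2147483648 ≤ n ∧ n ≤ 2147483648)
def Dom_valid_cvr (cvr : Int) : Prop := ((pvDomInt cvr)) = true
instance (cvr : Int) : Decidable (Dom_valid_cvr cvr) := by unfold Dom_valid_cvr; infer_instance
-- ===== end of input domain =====

-- B replaces A's special-cased reconstruction of the control digit by a single
-- weighted divisibility-by-11 test over all eight digits (objective: simpler).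


-- ===== PORT A =====
-- int(digit): under Pre_ (0 ≤ cvr) every character of str(cvr) is a decimal
-- digit, so ofChars? is `some`; the `.getD 0` default is unreachable there.
def valid_cvr (cvr : Int) : Bool :=
  let weights : List Int := [2, 7, 6, 5, 4, 3, 2]
  let cvr_digits : List Int :=
    (PySem.Int.toChars cvr).map (fun d => (PySem.Int.ofChars? [d]).getD 0)
  if cvr_digits.length ≠ 8 then false
  else
    let seven_cvr_digits := PySem.List.slice cvr_digits none (some (-1))
    let control_digit := (PySem.List.pyGet? cvr_digits (-1)).getD 0
    let mod_11 :=
      PySem.Int.mod (((seven_cvr_digits.zip weights).map (fun p => p.1 * p.2)).sum) 11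
    (mod_11 == 0 && control_digit == 0) || (mod_11 != 1 && (11 - mod_11 == control_digit))

-- ===== PORT B =====
def valid_cvr_alt (cvr : Int) : Bool :=
  let digits : List Int :=
    (PySem.Int.toChars cvr).map (fun d => (PySem.Int.ofChars? [d]).getD 0)
  if digits.length ≠ 8 then false
  else
    let weights : List Int := [2, 7, 6, 5, 4, 3, 2, 1]
    PySem.Int.mod (((digits.zip weights).map (fun p => p.1 * p.2)).sum) 11 == 0

-- ===== PRECONDITION & SPEC =====
-- Pre_ excludes negative cvr, on which both A and B raise ValueError (int('-')).
def Pre_valid_cvr (cvr : Int) : Prop := 0 ≤ cvr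
instance (cvr : Int) : Decidable (Pre_valid_cvr cvr) := by unfold Pre_valid_cvr; infer_instance
def pvWitness_valid_cvr : Int := 25313763

def Spec_valid_cvr (cvr : Int) (out : Bool) : Prop := out = valid_cvr_alt cvr
instance (cvr : Int) (out : Bool) : Decidable (Spec_valid_cvr cvr out) := by unfold Spec_valid_cvr; infer_instance

-- ===== CLAIM (what is proved, stated in full; the proofs are below) =====
def Claim_equal_valid_cvr : Prop := ∀ (cvr : Int), Dom_valid_cvr cvr → Pre_valid_cvr cvr → Spec_valid_cvr cvr (valid_cvr cvr)

-- ===== LEMMAS AND PROOFS =====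

-- every char produced by Nat.toDigitsCore is from the accumulator or a digitChar of some k < 10
lemma mem_toDigitsCore (fuel : Nat) : ∀ (n : Nat) (acc : List Char) (c : Char),
    c ∈ Nat.toDigitsCore 10 fuel n acc → c ∈ acc ∨ ∃ k, k < 10 ∧ c = Nat.digitChar k := by
  induction fuel with
  | zero => intro n acc c h; exact Or.inl h
  | succ fuel ih =>
    intro n acc c h
    simp only [Nat.toDigitsCore] at h
    split at h
    · rcases List.mem_cons.mp h with rfl | h2
      · exact Or.inr ⟨n % 10, by omega, rfl⟩
      · exact Or.inl h2
    · rcases ih _ _ _ h with h2 | h2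
      · rcases List.mem_cons.mp h2 with rfl | h3
        · exact Or.inr ⟨n % 10, by omega, rfl⟩
        · exact Or.inl h3
      · exact Or.inr h2

lemma digit_val_bounds (k : Nat) (hk : k < 10) :
    0 ≤ (PySem.Int.ofChars? [Nat.digitChar k]).getD 0 ∧
      (PySem.Int.ofChars? [Nat.digitChar k]).getD 0 ≤ 9 := by
  revert hk; revert k; decide

lemma digit_bounds (cvr : Int) (h : 0 ≤ cvr) (c : Char) (hc : c ∈ PySem.Int.toChars cvr) :
    0 ≤ (PySem.Int.ofChars? [c]).getD 0 ∧ (PySem.Int.ofChars? [c]).getD 0 ≤ 9 := by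
  simp only [PySem.Int.toChars, if_neg (by omega : ¬ cvr < 0)] at hc
  rcases mem_toDigitsCore _ _ _ _ hc with h' | ⟨k, hk, rfl⟩
  · simp at h'
  · exact digit_val_bounds k hk

theorem valid_cvr_spec : Claim_equal_valid_cvr := by
  intro cvr _ hpre
  unfold Spec_valid_cvr valid_cvr valid_cvr_alt
  have hb := digit_bounds cvr hpre
  generalize hL : PySem.Int.toChars cvr = L at hb
  by_cases h8 : (L.map (fun d => (PySem.Int.ofChars? [d]).getD 0)).length = 8
  · rw [List.length_map] at h8
    match L, h8 with
    | [c0, c1, c2, c3, c4, c5, c6, c7], _ =>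
      have b7 := hb c7 (by simp)
      simp only [List.map, List.zip, List.zipWith, List.sum_cons, List.sum_nil,
        PySem.List.slice, PySem.List.pyGet?, PySem.List.pyIdx?]
      norm_num
      rw [Bool.eq_iff_iff]
      simp only [Bool.or_eq_true, Bool.and_eq_true, beq_iff_eq, bne_iff_ne, ne_eq]
      omega
  · simp only [if_pos h8]
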